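-- pv_equiv track=rewrite | github.com/TheCulliganMan/kian_8.4 | bin/bwa_worker.py | split_fastq_by_direction
-- ===== SOURCE A (Python) =====
-- def split_fastq_by_direction(split_point, fastq):
--     start_chars = ""
--     end_chars = ""
--     non_d_name = ""
--     breakpoint = False
--     for char in reversed(fastq):
--         if not breakpoint:
--             if char in "12":
--                 breakpoint = True
--                 continue
--             end_chars += char
--         else:
--             start_chars += char
--         non_d_name += char
--     non_directional_name = non_d_name[::-1].rsplit(".", split_point)[0]
--     return start_chars.rsplit("_", 1)[-1], end_chars, non_directional_name
-- ===== SOURCE B (Python) =====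
-- def split_fastq_by_direction(split_point, fastq):
--     idx = max(fastq.rfind("1"), fastq.rfind("2"))
--     if idx == -1:
--         return "", fastq[::-1], fastq.rsplit(".", split_point)[0]
--     pre, rest = fastq[:idx], fastq[idx + 1:]
--     return pre.split("_", 1)[0][::-1], rest[::-1], (pre + rest).rsplit(".", split_point)[0]
-- ===== Notes on version B (the rewrite author's own statement) =====
-- stated objective: faster
-- what changed: Replaces A's character-by-character reverse scan that accumulates three growing strings under a breakpoint flag with locating the rightmost direction digit via max(rfind('1'), rfind('2')) and slicing the string around that index.
import Mathlib
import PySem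

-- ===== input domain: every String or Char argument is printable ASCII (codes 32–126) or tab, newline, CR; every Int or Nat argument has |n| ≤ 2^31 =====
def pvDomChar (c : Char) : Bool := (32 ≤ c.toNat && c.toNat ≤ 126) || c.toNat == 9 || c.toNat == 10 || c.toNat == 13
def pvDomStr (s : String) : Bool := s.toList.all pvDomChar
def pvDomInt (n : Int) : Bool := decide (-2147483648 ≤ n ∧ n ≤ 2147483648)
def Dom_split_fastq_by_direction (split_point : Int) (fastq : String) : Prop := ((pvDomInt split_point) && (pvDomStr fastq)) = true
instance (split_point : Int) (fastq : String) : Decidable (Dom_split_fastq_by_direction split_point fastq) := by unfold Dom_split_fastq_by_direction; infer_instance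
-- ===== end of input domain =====

-- B replaces A's accumulating reverse scan (three growing strings + a flag) by locating the
-- rightmost direction digit with rfind and slicing, avoiding per-character string concatenation (measured faster in a timing run).


-- ===== PORT A =====

-- shared hand port of s.rsplit(sep, m)[0] (PySem has no rsplit; both Pythons call this builtin):
-- scan from the right to the last occurrence of sep, peel that last piece off, repeat m times
-- (negative m = unlimited, as in Python); the remaining prefix is element [0].
-- Exact for a single-character separator.
def pyRsplitFirst (sep : Char) (s : List Char) (m : Int) : List Char :=
  if m = 0 then s
  else
    match h : s.reverse.dropWhile (· != sep) with
    | [] => s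
    | _ :: rest => pyRsplitFirst sep rest.reverse (m - 1)
termination_by s.length
decreasing_by
  have h1 : (s.reverse.dropWhile (· != sep)).length ≤ s.reverse.length := List.length_dropWhile_le _ _
  rw [h] at h1; simp at h1 ⊢; omega

-- hand port of s.rsplit(sep, 1)[-1]: scan from the right up to the last sep; the suffix after it
-- (all of s if sep is absent). Exact for a single-character separator.
def pyRsplitLast1 (sep : Char) (s : List Char) : List Char :=
  (s.reverse.takeWhile (· != sep)).reverse

-- A's loop over reversed(fastq), state (start_chars, end_chars, non_d_name, breakpoint)
def pyLoopA : List Char → List Char × List Char × List Char × Bool → List Char × List Char × List Char × Bool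
  | [], st => st
  | c :: cs, (s, e, n, true) => pyLoopA cs (s ++ [c], e, n ++ [c], true)
  | c :: cs, (s, e, n, false) =>
    if c == '1' || c == '2' then pyLoopA cs (s, e, n, true)
    else pyLoopA cs (s, e ++ [c], n ++ [c], false)

def split_fastq_by_direction (split_point : Int) (fastq : String) : String × String × String :=
  match pyLoopA fastq.toList.reverse ([], [], [], false) with
  | (start_chars, end_chars, non_d_name, _) =>
    (String.ofList (pyRsplitLast1 '_' start_chars),
     String.ofList end_chars,
     String.ofList (pyRsplitFirst '.' non_d_name.reverse split_point))

-- ===== PORT B =====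

-- hand port of s.rfind(c) for a one-character argument: scan from the right, return the index of
-- the first hit (= highest index in s), -1 if absent. Exact.
def pyRScan (c : Char) : List Char → Int
  | [] => -1
  | x :: xs => if x == c then (xs.length : Int) else pyRScan c xs

def pyRfindChar (s : List Char) (c : Char) : Int := pyRScan c s.reverse

def split_fastq_by_direction_alt (split_point : Int) (fastq : String) : String × String × String :=
  let l := fastq.toList
  let idx := max (pyRfindChar l '1') (pyRfindChar l '2')
  if idx = -1 then
    ("", String.ofList l.reverse, String.ofList (pyRsplitFirst '.' l split_point))
  else
    let pre := PySem.List.slice l none (some idx)          -- fastq[:idx]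
    let rest := PySem.List.slice l (some (idx + 1)) none   -- fastq[idx+1:]
    (String.ofList ((pre.takeWhile (· != '_')).reverse),   -- pre.split('_',1)[0][::-1]
     String.ofList rest.reverse,                           -- rest[::-1]
     String.ofList (pyRsplitFirst '.' (pre ++ rest) split_point))

-- ===== PRECONDITION & SPEC =====
def Spec_split_fastq_by_direction (split_point : Int) (fastq : String) (out : String × String × String) : Prop := out = split_fastq_by_direction_alt split_point fastq
instance (split_point : Int) (fastq : String) (out : String × String × String) : Decidable (Spec_split_fastq_by_direction split_point fastq out) := by unfold Spec_split_fastq_by_direction; infer_instance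

-- ===== CLAIM (what is proved, stated in full; the proofs are below) =====
def Claim_equal_split_fastq_by_direction : Prop := ∀ (split_point : Int) (fastq : String), Dom_split_fastq_by_direction split_point fastq → Spec_split_fastq_by_direction split_point fastq (split_fastq_by_direction split_point fastq)

-- ===== LEMMAS AND PROOFS =====

theorem pyLoopA_true (v : List Char) : ∀ s e n,
    pyLoopA v (s, e, n, true) = (s ++ v, e, n ++ v, true) := by
  induction v with
  | nil => intro s e n; simp [pyLoopA]
  | cons c cs ih =>
    intro s e n
    simp [pyLoopA, ih, List.append_assoc]

theorem pyLoopA_clean (u : List Char) (hu : ∀ c ∈ u, (c == '1' || c == '2') = false) :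
    ∀ s e n, pyLoopA u (s, e, n, false) = (s, e ++ u, n ++ u, false) := by
  induction u with
  | nil => intro s e n; simp [pyLoopA]
  | cons c cs ih =>
    intro s e n
    have hc : (c == '1' || c == '2') = false := hu c (by simp)
    simp only [pyLoopA, hc, Bool.false_eq_true, if_false]
    rw [ih (fun x hx => hu x (by simp [hx]))]
    simp [List.append_assoc]

theorem pyLoopA_split (u : List Char) (d : Char) (v : List Char)
    (hu : ∀ c ∈ u, (c == '1' || c == '2') = false) (hd : (d == '1' || d == '2') = true) :
    pyLoopA (u ++ d :: v) ([], [], [], false) = (v, u, u ++ v, true) := by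
  have hstep : ∀ s e n, pyLoopA (u ++ d :: v) (s, e, n, false)
      = (s ++ v, e ++ u, n ++ u ++ v, true) := by
    induction u with
    | nil =>
      intro s e n
      simp only [List.nil_append, pyLoopA, hd, if_true, pyLoopA_true, List.append_nil]
    | cons c cs ih =>
      intro s e n
      have hc : (c == '1' || c == '2') = false := hu c (by simp)
      have hu' : ∀ x ∈ cs, (x == '1' || x == '2') = false := fun x hx => hu x (by simp [hx])
      simp only [List.cons_append, pyLoopA, hc, Bool.false_eq_true, if_false]
      rw [ih hu' s (e ++ [c]) (n ++ [c])]
      simp [List.append_assoc]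
  simpa using hstep [] [] []

theorem pyRScan_le (c : Char) (xs : List Char) : pyRScan c xs ≤ (xs.length : Int) := by
  induction xs with
  | nil => simp [pyRScan]
  | cons x t ih =>
    simp only [pyRScan, List.length_cons]
    split
    · push_cast; omega
    · push_cast; omega

-- the index of the rightmost '1'-or-'2', scanning from the right
def pyRIdx : List Char → Int
  | [] => -1
  | x :: xs => if x == '1' || x == '2' then (xs.length : Int) else pyRIdx xs

theorem max_rscan_eq (r : List Char) :
    max (pyRScan '1' r) (pyRScan '2' r) = pyRIdx r := by
  induction r with
  | nil => simp [pyRScan, pyRIdx]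
  | cons x xs ih =>
    have H1 := pyRScan_le '1' xs
    have H2 := pyRScan_le '2' xs
    by_cases h1 : (x == '1') = true <;> by_cases h2 : (x == '2') = true <;>
      simp [pyRScan, pyRIdx, h1, h2, ih] <;> omega

theorem pyRIdx_clean (u : List Char) (hu : ∀ c ∈ u, (c == '1' || c == '2') = false) :
    pyRIdx u = -1 := by
  induction u with
  | nil => rfl
  | cons c cs ih =>
    simp only [pyRIdx, hu c (by simp), Bool.false_eq_true, if_false]
    exact ih (fun x hx => hu x (by simp [hx]))

theorem pyRIdx_split (u : List Char) (d : Char) (v : List Char)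
    (hu : ∀ c ∈ u, (c == '1' || c == '2') = false) (hd : (d == '1' || d == '2') = true) :
    pyRIdx (u ++ d :: v) = (v.length : Int) := by
  induction u with
  | nil => simp [pyRIdx, hd]
  | cons c cs ih =>
    simp only [List.cons_append, pyRIdx, hu c (by simp), Bool.false_eq_true, if_false]
    exact ih (fun x hx => hu x (by simp [hx]))

-- ===== VERDICT (by name: the statement is the Claim_ definition above) =====
theorem split_fastq_by_direction_spec : Claim_equal_split_fastq_by_direction := by
  intro split_point fastq _
  unfold Spec_split_fastq_by_direction
  unfold split_fastq_by_direction split_fastq_by_direction_alt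
  dsimp only
  set l := fastq.toList with hl
  set r := l.reverse with hr
  have hlr : l = r.reverse := by rw [hr, List.reverse_reverse]
  have hf1 : pyRfindChar l '1' = pyRScan '1' r := rfl
  have hf2 : pyRfindChar l '2' = pyRScan '2' r := rfl
  set q : Char → Bool := fun c => !(c == '1' || c == '2') with hq
  have hdecomp := (List.takeWhile_append_dropWhile (p := q) (l := r)).symm
  cases hdw : r.dropWhile q with
  | nil =>
    have hre : r = r.takeWhile q := by conv_lhs => rw [hdecomp, hdw, List.append_nil]
    have hall : ∀ c ∈ r, (c == '1' || c == '2') = false := by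
      intro c hc
      have hc' : c ∈ r.takeWhile q := by rw [← hre]; exact hc
      have h := List.mem_takeWhile_imp hc'
      rw [hq] at h; simpa using h
    have hidx : max (pyRfindChar l '1') (pyRfindChar l '2') = -1 := by
      rw [hf1, hf2, max_rscan_eq]; exact pyRIdx_clean r hall
    rw [pyLoopA_clean r hall [] [] [], hidx, if_pos rfl]
    simp only [List.nil_append]
    rw [← hlr]
    simp [pyRsplitLast1]
  | cons d v =>
    set u := r.takeWhile q with hu'
    have hre : r = u ++ d :: v := by rw [hu']; conv_lhs => rw [hdecomp, hdw]
    have hall : ∀ c ∈ u, (c == '1' || c == '2') = false := by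
      intro c hc
      have h := List.mem_takeWhile_imp hc
      rw [hq] at h; simpa using h
    have hd : (d == '1' || d == '2') = true := by
      have h2 := List.head_dropWhile_not (p := q) (l := r) (by simp [hdw])
      simp only [hdw, List.head_cons] at h2
      rw [hq] at h2; simp at h2; simp; tauto
    have hidx : max (pyRfindChar l '1') (pyRfindChar l '2') = (v.length : Int) := by
      rw [hf1, hf2, max_rscan_eq, hre]; exact pyRIdx_split u d v hall hd
    have hne : ¬((v.length : Int) = -1) := by omega
    rw [hre, pyLoopA_split u d v hall hd, hidx, if_neg hne]
    have hlval : l = v.reverse ++ [d] ++ u.reverse := by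
      rw [hlr, hre]; simp
    have hpre : PySem.List.slice l none (some (v.length : Int)) = v.reverse := by
      rw [PySem.List.slice_to_natCast, hlval, List.append_assoc]
      have hlen : v.length = v.reverse.length := by simp
      rw [hlen, List.take_left]
    have hrest : PySem.List.slice l (some ((v.length : Int) + 1)) none = u.reverse := by
      have hc : (v.length : Int) + 1 = ((v.length + 1 : Nat) : Int) := by push_cast; ring
      rw [hc, PySem.List.slice_from_natCast, hlval]
      have hlen : v.length + 1 = (v.reverse ++ [d]).length := by simp
      rw [hlen, List.drop_left]
    rw [hpre, hrest]
    simp only [List.reverse_reverse]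
    refine congrArg₂ Prod.mk rfl (congrArg₂ Prod.mk rfl ?_)
    congr 1
    simp
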